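-- pv_equiv track=rewrite | github.com/chainsyncstore/ChainSync2.0 | scripts/update_email_logos.py | insert_after_line
-- ===== SOURCE A (Python) =====
-- def insert_after_line(text: str, line_fragment: str, insertion: str, count: int = 1) -> str:
--     occurrences = 0
--     parts = []
--     start = 0
--     while occurrences < count:
--         idx = text.find(line_fragment, start)
--         if idx == -1:
--             break
--         end_idx = idx + len(line_fragment)
--         parts.append(text[start:end_idx])
--         parts.append(insertion)
--         start = end_idx
--         occurrences += 1
--     if occurrences < count:
--         raise RuntimeError(f"Expected to insert after '{line_fragment}' {count} times, but only found {occurrences} occurrences")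
--     parts.append(text[start:])
--     return "".join(parts)
-- ===== SOURCE B (Python) =====
-- def insert_after_line(text: str, line_fragment: str, insertion: str, count: int = 1) -> str:
--     if count <= 0:
--         return text
--     if not line_fragment:
--         # every find of '' matches at the current position: count insertions up front
--         return insertion * count + text
--     pieces = text.split(line_fragment)
--     if len(pieces) <= count:
--         raise RuntimeError(
--             f"Expected to insert after '{line_fragment}' {count} times, "
--             f"but only found {len(pieces) - 1} occurrences"
--         )
--     sep = line_fragment + insertion
--     return sep.join(pieces[:count]) + sep + line_fragment.join(pieces[count:])
-- ===== Notes on version B (the rewrite author's own statement) =====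
-- stated objective: alternative
-- what changed: A's incremental find-and-append while-loop is replaced by a single text.split(line_fragment) followed by join operations (plus closed forms for count<=0 and the empty fragment), a different decomposition of the same task.
import Mathlib
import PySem

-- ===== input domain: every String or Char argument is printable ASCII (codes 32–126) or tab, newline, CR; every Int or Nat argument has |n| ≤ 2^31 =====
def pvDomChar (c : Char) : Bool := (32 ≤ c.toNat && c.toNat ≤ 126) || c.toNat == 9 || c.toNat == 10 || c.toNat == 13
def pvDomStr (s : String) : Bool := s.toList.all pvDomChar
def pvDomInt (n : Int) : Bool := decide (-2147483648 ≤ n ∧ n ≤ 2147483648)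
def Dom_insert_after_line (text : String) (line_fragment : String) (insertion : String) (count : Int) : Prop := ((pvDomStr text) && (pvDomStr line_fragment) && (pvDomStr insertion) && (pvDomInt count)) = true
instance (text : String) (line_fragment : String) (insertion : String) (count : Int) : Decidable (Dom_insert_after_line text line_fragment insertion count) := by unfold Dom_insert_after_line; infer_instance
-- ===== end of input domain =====

-- B replaces A's incremental find-and-append while-loop by one text.split(fragment) plus joins (alternative decomposition).

-- ===== PORT A =====
-- A's while-loop: state (start, parts); the loop body runs at most count.toNat times (occurrences
-- counts 0,1,… while occurrences < count), so count.toNat is the exact iteration budget; `none`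
-- means the loop broke early with occurrences < count, where Python raises RuntimeError
-- (those inputs are excluded by Pre_).
def insertLoopA (t f ins : List Char) : Nat → Int → List (List Char) → Option (Int × List (List Char))
  | 0, start, parts => some (start, parts)
  | Nat.succ r, start, parts =>
    let idx := PySem.Chars.findFrom t f start none      -- idx = text.find(line_fragment, start)
    if idx = -1 then none
    else
      let e := idx + (f.length : Int)                   -- end_idx = idx + len(line_fragment)
      -- parts.append(text[start:end_idx]); parts.append(insertion)
      insertLoopA t f ins r e (parts ++ [PySem.List.slice t (some start) (some e), ins])

def insert_after_line (text : String) (line_fragment : String) (insertion : String) (count : Int) : String :=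
  match insertLoopA text.toList line_fragment.toList insertion.toList count.toNat 0 [] with
  | none => ""   -- Python raises RuntimeError here (outside Pre_)
  | some (start, parts) =>
      -- parts.append(text[start:]); return "".join(parts)
      String.ofList (PySem.Chars.join [] (parts ++ [PySem.List.slice text.toList (some start) none]))

-- ===== PORT B =====
-- insertion * count  (for count ≥ 0)
def repFlat (ins : List Char) : Nat → List Char
  | 0 => []
  | Nat.succ n => ins ++ repFlat ins n

def insert_after_line_alt (text : String) (line_fragment : String) (insertion : String) (count : Int) : String :=
  if count ≤ 0 then String.ofList text.toList
  else if line_fragment.toList.isEmpty then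
    String.ofList (repFlat insertion.toList count.toNat ++ text.toList)   -- insertion * count + text
  else
    let pieces := PySem.Chars.splitOn text.toList line_fragment.toList    -- text.split(line_fragment)
    if (pieces.length : Int) ≤ count then ""   -- Python raises RuntimeError here (outside Pre_)
    else
      let sep := line_fragment.toList ++ insertion.toList
      -- pieces[:count] / pieces[count:] as take/drop: exact since count > 0 here
      String.ofList (PySem.Chars.join sep (pieces.take count.toNat) ++ sep ++
                     PySem.Chars.join line_fragment.toList (pieces.drop count.toNat))

-- ===== PRECONDITION & SPEC =====
-- Pre_ excludes exactly the inputs on which A raises RuntimeError: a nonempty fragment with fewer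
-- greedy non-overlapping occurrences in text than count (i.e. text.split(fragment) has ≤ count
-- pieces).  With an empty fragment A never raises.
def Pre_insert_after_line (text : String) (line_fragment : String) (insertion : String) (count : Int) : Prop :=
  line_fragment = "" ∨ count ≤ ((PySem.Chars.splitOn text.toList line_fragment.toList).length : Int) - 1

instance (text : String) (line_fragment : String) (insertion : String) (count : Int) : Decidable (Pre_insert_after_line text line_fragment insertion count) := by unfold Pre_insert_after_line; infer_instance

def pvWitness_insert_after_line : String × String × String × Int := ("abcabc", "b", "X", 2)

def Spec_insert_after_line (text : String) (line_fragment : String) (insertion : String) (count : Int) (out : String) : Prop := out = insert_after_line_alt text line_fragment insertion count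
instance (text : String) (line_fragment : String) (insertion : String) (count : Int) (out : String) : Decidable (Spec_insert_after_line text line_fragment insertion count out) := by unfold Spec_insert_after_line; infer_instance

-- ===== CLAIM (what is proved, stated in full; the proofs are below) =====
def Claim_equal_insert_after_line : Prop := ∀ (text : String) (line_fragment : String) (insertion : String) (count : Int), Dom_insert_after_line text line_fragment insertion count → Pre_insert_after_line text line_fragment insertion count → Spec_insert_after_line text line_fragment insertion count (insert_after_line text line_fragment insertion count)

-- ===== LEMMAS AND PROOFS =====

theorem pvFindEqOf (l f : List Char) (n : Nat) (h1 : f <+: l.drop n)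
    (h2 : ∀ i < n, ¬ f <+: l.drop i) : PySem.Chars.find l f = (n : Int) := by
  have hin : PySem.Chars.isIn f l = true :=
    (PySem.Chars.exists_prefix_drop_iff_isIn (sub := f) (s := l)).mp ⟨n, h1⟩
  have hinf : f <:+: l := (PySem.Chars.isIn_iff_infix (sub := f) (s := l)).mp hin
  have h0 : 0 ≤ PySem.Chars.find l f := (PySem.Chars.find_nonneg_iff (s := l) (sub := f)).mpr hinf
  obtain ⟨hp, hmin⟩ := PySem.Chars.find_spec (s := l) (sub := f) h0
  rcases lt_trichotomy (PySem.Chars.find l f).toNat n with h | h | h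
  · exact absurd hp (h2 _ h)
  · omega
  · exact absurd h1 (hmin _ h)

theorem pvFindNilRight (f : List Char) (hf : f ≠ []) : PySem.Chars.find [] f = -1 := by
  rw [PySem.Chars.find_eq_neg_one_iff]
  simp [hf]

theorem pvFindZero (l f : List Char) (h : f <+: l) : PySem.Chars.find l f = 0 := by
  have := pvFindEqOf l f 0 (by simpa) (by omega)
  simpa using this

theorem pvCutLe (l f : List Char) (h : PySem.Chars.find l f ≠ -1) :
    (PySem.Chars.find l f).toNat + f.length ≤ l.length := by
  have h0 : 0 ≤ PySem.Chars.find l f := by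
    have := PySem.Chars.neg_one_le_find (s := l) (sub := f); omega
  obtain ⟨hp, -⟩ := PySem.Chars.find_spec (s := l) (sub := f) h0
  have hle := PySem.Chars.find_le_length (s := l) (sub := f)
  have := hp.length_le
  simp [List.length_drop] at this
  omega

theorem pvTakeCut (l f : List Char) (h : PySem.Chars.find l f ≠ -1) :
    l.take ((PySem.Chars.find l f).toNat + f.length)
      = l.take (PySem.Chars.find l f).toNat ++ f := by
  have h0 : 0 ≤ PySem.Chars.find l f := by
    have := PySem.Chars.neg_one_le_find (s := l) (sub := f); omega
  obtain ⟨hp, -⟩ := PySem.Chars.find_spec (s := l) (sub := f) h0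
  obtain ⟨tail, ht⟩ := hp
  rw [List.take_add, ← ht]
  simp

theorem pvFindCons (c : Char) (rest f : List Char)
    (hnp : ¬ f <+: (c :: rest)) :
    PySem.Chars.find (c :: rest) f
      = if PySem.Chars.find rest f = -1 then -1 else PySem.Chars.find rest f + 1 := by
  by_cases hr : PySem.Chars.find rest f = -1
  · rw [if_pos hr]
    rw [PySem.Chars.find_eq_neg_one_iff] at hr ⊢
    intro hinf
    apply hr
    rw [← PySem.Chars.isIn_iff_infix, ← PySem.Chars.exists_prefix_drop_iff_isIn]
    rw [← PySem.Chars.isIn_iff_infix, ← PySem.Chars.exists_prefix_drop_iff_isIn] at hinf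
    obtain ⟨j, hj⟩ := hinf
    cases j with
    | zero => exact absurd (by simpa using hj) hnp
    | succ j => exact ⟨j, by simpa using hj⟩
  · rw [if_neg hr]
    have h0 : 0 ≤ PySem.Chars.find rest f := by
      have := PySem.Chars.neg_one_le_find (s := rest) (sub := f); omega
    obtain ⟨hp, hmin⟩ := PySem.Chars.find_spec (s := rest) (sub := f) h0
    have := pvFindEqOf (c :: rest) f ((PySem.Chars.find rest f).toNat + 1)
      (by simpa using hp)
      (by
        intro i hi
        cases i with
        | zero => simpa using hnp
        | succ i => simpa using hmin i (by omega))
    rw [this]; push_cast [Int.toNat_of_nonneg h0]; ring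

def piecesR (f : List Char) (l : List Char) : List (List Char) :=
  if h : PySem.Chars.find l f = -1 ∨ f = [] then [l]
  else
    l.take (PySem.Chars.find l f).toNat
      :: piecesR f (l.drop ((PySem.Chars.find l f).toNat + f.length))
termination_by l.length
decreasing_by
  push Not at h
  have h1 := pvCutLe l f h.1
  have : 0 < f.length := List.length_pos_of_ne_nil h.2
  simp [List.length_drop]
  omega

theorem piecesR_single (f l : List Char) (h : PySem.Chars.find l f = -1 ∨ f = []) :
    piecesR f l = [l] := by
  rw [piecesR, dif_pos h]

theorem piecesR_cons (f l : List Char) (h1 : PySem.Chars.find l f ≠ -1) (h2 : f ≠ []) :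
    piecesR f l = l.take (PySem.Chars.find l f).toNat
      :: piecesR f (l.drop ((PySem.Chars.find l f).toNat + f.length)) := by
  rw [piecesR, dif_neg (by tauto)]

theorem piecesR_ne_nil (f l : List Char) : piecesR f l ≠ [] := by
  by_cases h : PySem.Chars.find l f = -1 ∨ f = []
  · rw [piecesR_single f l h]; simp
  · push Not at h; rw [piecesR_cons f l h.1 h.2]; simp

theorem pvJoinCons (sep a : List Char) (l : List (List Char)) (h : l ≠ []) :
    PySem.Chars.join sep (a :: l) = a ++ sep ++ PySem.Chars.join sep l := by
  cases l with
  | nil => exact absurd rfl h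
  | cons b l => rw [PySem.Chars.join_cons_cons]

theorem pvJoinNilFlatten (ps : List (List Char)) :
    PySem.Chars.join [] ps = ps.flatten := by
  induction ps with
  | nil => simp [PySem.Chars.join, List.intercalate]
  | cons a l ih =>
    cases l with
    | nil => simp [PySem.Chars.join_singleton]
    | cons b l' => rw [PySem.Chars.join_cons_cons]; simp [ih]

theorem pvJoinPiecesR (f : List Char) (hf : f ≠ []) :
    ∀ l, PySem.Chars.join f (piecesR f l) = l := by
  intro l
  induction hn : l.length using Nat.strong_induction_on generalizing l with
  | _ n ih =>
  subst hn
  by_cases h : PySem.Chars.find l f = -1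
  · rw [piecesR_single f l (Or.inl h), PySem.Chars.join_singleton]
  · rw [piecesR_cons f l h hf]
    rw [pvJoinCons _ _ _ (piecesR_ne_nil _ _)]
    have hcut := pvCutLe l f h
    have hfl : 0 < f.length := List.length_pos_of_ne_nil hf
    rw [ih (l.drop ((PySem.Chars.find l f).toNat + f.length)).length
        (by simp [List.length_drop]; omega) _ rfl]
    rw [← pvTakeCut l f h]
    exact List.take_append_drop _ l

theorem pvGoEq (f : List Char) (hf : f ≠ []) :
    ∀ (fuel : Nat) (l cur : List Char) (acc : List (List Char)), l.length ≤ fuel →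
      PySem.Chars.splitOn.go f fuel l cur acc
        = acc.reverse ++ (piecesR f l).modifyHead (fun p => cur.reverse ++ p) := by
  intro fuel
  induction fuel with
  | zero =>
    intro l cur acc h
    have hl : l = [] := List.eq_nil_of_length_eq_zero (Nat.le_zero.mp h)
    subst hl
    rw [PySem.Chars.splitOn.go]
    rw [piecesR_single f [] (Or.inl (pvFindNilRight f hf))]
    simp
  | succ n ih =>
    intro l cur acc h
    cases l with
    | nil =>
      rw [PySem.Chars.splitOn.go]
      · rw [piecesR_single f [] (Or.inl (pvFindNilRight f hf))]
        simp
      · omega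
    | cons c rest =>
      rw [PySem.Chars.splitOn.go]
      by_cases hp : f.isPrefixOf (c :: rest)
      · rw [if_pos hp]
        have hpre : f <+: (c :: rest) := List.isPrefixOf_iff_prefix.mp hp
        have hfind : PySem.Chars.find (c :: rest) f = 0 := pvFindZero _ _ hpre
        have hfl : 0 < f.length := List.length_pos_of_ne_nil hf
        rw [ih _ _ _ (by simp at h ⊢; omega)]
        rw [piecesR_cons f (c :: rest) (by rw [hfind]; omega) hf]
        rw [hfind]
        cases hps : piecesR f (List.drop ((0:Int).toNat + f.length) (c :: rest)) with
        | nil => exact absurd hps (piecesR_ne_nil _ _)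
        | cons p ps => simp at hps; simp [hps]
      · rw [if_neg hp]
        have hnp : ¬ f <+: (c :: rest) := fun hc => hp (List.isPrefixOf_iff_prefix.mpr hc)
        have hfc := pvFindCons c rest f hnp
        rw [ih _ _ _ (by simp at h; omega)]
        by_cases hr : PySem.Chars.find rest f = -1
        · rw [piecesR_single f rest (Or.inl hr),
              piecesR_single f (c :: rest) (Or.inl (by rw [hfc, if_pos hr]))]
          simp
        · have h0 : 0 ≤ PySem.Chars.find rest f := by
            have := PySem.Chars.neg_one_le_find (s := rest) (sub := f); omega
          have hfl : PySem.Chars.find (c :: rest) f = PySem.Chars.find rest f + 1 := by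
            rw [hfc, if_neg hr]
          rw [piecesR_cons f rest hr hf,
              piecesR_cons f (c :: rest) (by rw [hfl]; omega) hf]
          rw [hfl]
          have htn : (PySem.Chars.find rest f + 1).toNat = (PySem.Chars.find rest f).toNat + 1 := by
            omega
          rw [htn]
          rw [show (PySem.Chars.find rest f).toNat + 1 + f.length
                = ((PySem.Chars.find rest f).toNat + f.length) + 1 from by omega]
          simp [List.take_succ_cons]

theorem pvSplitOnEq (f l : List Char) (hf : f ≠ []) :
    PySem.Chars.splitOn l f = piecesR f l := by
  unfold PySem.Chars.splitOn
  rw [pvGoEq f hf _ _ _ _ (by omega)]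
  cases hps : piecesR f l with
  | nil => exact absurd hps (piecesR_ne_nil _ _)
  | cons p ps => simp

-- shared recursive skeleton of the equivalence proof: n insertions walking the suffix
def goR (f ins : List Char) : Nat → List Char → Option (List Char)
  | 0, u => some u
  | Nat.succ n, u =>
    if h : PySem.Chars.find u f = -1 then none
    else
      (goR f ins n (u.drop ((PySem.Chars.find u f).toNat + f.length))).map
        (fun v => u.take ((PySem.Chars.find u f).toNat + f.length) ++ ins ++ v)

theorem pvGoREq (f ins : List Char) (hf : f ≠ []) :
    ∀ (n : Nat) (u : List Char), 0 < n → n < (piecesR f u).length →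
      goR f ins n u
        = some (PySem.Chars.join (f ++ ins) ((piecesR f u).take n) ++ (f ++ ins)
            ++ PySem.Chars.join f ((piecesR f u).drop n)) := by
  intro n
  induction n with
  | zero => intro u h; omega
  | succ n ih =>
    intro u _ hlen
    have hfind : PySem.Chars.find u f ≠ -1 := by
      intro hcon
      rw [piecesR_single f u (Or.inl hcon)] at hlen
      simp at hlen
    rw [piecesR_cons f u hfind hf] at hlen ⊢
    rw [goR, dif_neg hfind]
    by_cases hn : n = 0
    · subst hn
      rw [goR]
      rw [List.take_succ_cons, List.take_zero, List.drop_succ_cons, List.drop_zero]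
      rw [PySem.Chars.join_singleton, pvJoinPiecesR f hf]
      rw [pvTakeCut u f hfind]
      simp [List.append_assoc]
    · have hlen' : n < (piecesR f (u.drop ((PySem.Chars.find u f).toNat + f.length))).length := by
        simp at hlen; omega
      rw [ih _ (by omega) hlen']
      simp only [Option.map_some]
      congr 1
      rw [List.take_succ_cons, List.drop_succ_cons]
      rw [pvJoinCons (f ++ ins) _ _ (by
        intro hc
        rcases List.take_eq_nil_iff.mp hc with hx | hx
        · exact hn hx
        · rw [hx] at hlen'; simp at hlen')]
      rw [pvTakeCut u f hfind]
      simp [List.append_assoc]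


theorem pvLoopAEq (t f ins : List Char) (hf : f ≠ []) :
    ∀ (n : Nat) (s : Nat) (parts : List (List Char)), s ≤ t.length →
      (insertLoopA t f ins n (s : Int) parts).map
          (fun r => PySem.Chars.join [] (r.2 ++ [PySem.List.slice t (some r.1) none]))
        = (goR f ins n (t.drop s)).map (fun u => parts.flatten ++ u) := by
  intro n
  induction n with
  | zero =>
    intro s parts hs
    simp [insertLoopA, goR, pvJoinNilFlatten, PySem.List.slice_from_natCast]
  | succ n ih =>
    intro s parts hs
    rw [insertLoopA]
    simp only []
    rw [PySem.Chars.findFrom_natCast t f s hs]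
    by_cases hj : PySem.Chars.find (t.drop s) f = -1
    · rw [if_pos (by rw [hj]; simp)]
      rw [goR, dif_pos hj]
      simp
    · have h0 : 0 ≤ PySem.Chars.find (t.drop s) f := by
        have := PySem.Chars.neg_one_le_find (s := t.drop s) (sub := f); omega
      rw [if_neg hj]
      set j := PySem.Chars.find (t.drop s) f with hjdef
      have hne : ¬ ((s : Int) + j = -1) := by omega
      rw [if_neg hne]
      have hcut := pvCutLe (t.drop s) f hj
      rw [List.length_drop] at hcut
      have hcast : (s : Int) + j + (f.length : Int) = ((s + j.toNat + f.length : Nat) : Int) := by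
        push_cast [Int.toNat_of_nonneg h0]; ring
      have hcast2 : (s : Int) + j = ((s + j.toNat : Nat) : Int) := by
        push_cast [Int.toNat_of_nonneg h0]; ring
      rw [hcast]
      rw [show PySem.List.slice t (some (s : Int)) (some ((s + j.toNat + f.length : Nat) : Int))
            = (t.drop s).take (j.toNat + f.length) from by
        rw [PySem.List.slice_natCast]
        congr 1
        omega]
      rw [ih (s + j.toNat + f.length) _ (by omega)]
      rw [goR, dif_neg hj, ← hjdef]
      rw [show List.drop (s + j.toNat + f.length) t
            = (t.drop s).drop (j.toNat + f.length) from by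
        rw [List.drop_drop]
        congr 1
        omega]
      cases hg : goR f ins n ((t.drop s).drop (j.toNat + f.length)) with
      | none => simp
      | some v => simp [List.append_assoc]


-- the parts A's loop appends when the fragment is empty: n repetitions of [text[0:0], insertion]
def stuffsR (ins : List Char) : Nat → List (List Char)
  | 0 => []
  | Nat.succ n => [] :: ins :: stuffsR ins n

theorem pvStuffsFlatten (ins : List Char) : ∀ n, (stuffsR ins n).flatten = repFlat ins n := by
  intro n
  induction n with
  | zero => simp [stuffsR, repFlat]
  | succ n ih => simp [stuffsR, repFlat, ih]

theorem pvLoopANil (t ins : List Char) :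
    ∀ (n : Nat) (parts : List (List Char)),
      insertLoopA t [] ins n 0 parts = some (0, parts ++ stuffsR ins n) := by
  intro n
  induction n with
  | zero => intro parts; simp [insertLoopA, stuffsR]
  | succ n ih =>
    intro parts
    rw [insertLoopA]
    simp only []
    rw [show (0 : Int) = ((0 : Nat) : Int) from rfl]
    rw [PySem.Chars.findFrom_natCast t [] 0 (by omega)]
    simp [PySem.Chars.find_nil, PySem.List.slice_to, ih, stuffsR]

-- ===== VERDICT (by name: the statement is the Claim_ definition above) =====
theorem insert_after_line_spec : Claim_equal_insert_after_line := by
  intro text frag ins count _ hpre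
  unfold Spec_insert_after_line insert_after_line insert_after_line_alt
  by_cases hc : count ≤ 0
  · rw [Int.toNat_of_nonpos hc, if_pos hc]
    simp [insertLoopA, PySem.List.slice_from]
  · rw [if_neg hc]
    have hcpos : 0 < count := by omega
    by_cases hfe : frag.toList = []
    · rw [if_pos (by simp [hfe])]
      rw [hfe, pvLoopANil]
      simp [pvJoinNilFlatten, pvStuffsFlatten, PySem.List.slice_from]
    · rw [if_neg (by simp [hfe])]
      have hfs : frag ≠ "" := fun hc' => hfe (by simp [hc'])
      have hpre' : count ≤ ((PySem.Chars.splitOn text.toList frag.toList).length : Int) - 1 :=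
        hpre.resolve_left hfs
      rw [pvSplitOnEq frag.toList text.toList hfe] at hpre' ⊢
      have hcount : count = (count.toNat : Int) := by omega
      have hlen : count.toNat < (piecesR frag.toList text.toList).length := by omega
      rw [if_neg (by omega)]
      have hA := pvLoopAEq text.toList frag.toList ins.toList hfe count.toNat 0 [] (by omega)
      rw [List.drop_zero] at hA
      rw [pvGoREq frag.toList ins.toList hfe count.toNat text.toList (by omega) hlen] at hA
      simp only [Option.map_some, List.flatten_nil, List.nil_append, Nat.cast_zero] at hA
      obtain ⟨r, hr, hgr⟩ := Option.map_eq_some_iff.mp hA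
      obtain ⟨st, pr⟩ := r
      rw [hr]
      exact congrArg String.ofList hgr
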